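-- pv_equiv track=rewrite | github.com/elee-github/AdventOfCode2022 | day9/day9.py | movement
-- ===== SOURCE A (Python) =====
-- def isNegative(x):
--     if x < 0:
--         return -1
--     elif x > 0:
--         return 1
--     return 0
--
-- def movement(hr, hc, tr, tc):
--     safe = set()
--     for i in range(hr - 1, hr + 2):
--         for j in range(hc - 1, hc + 2):
--             safe.add((i, j))
--
--     rDir = isNegative(hr - tr)
--     cDir = isNegative(hc - tc)
--
--     if (tr, tc) in safe:
--         return (tr, tc)
--     elif tr == hr:
--         return (tr, tc + cDir)
--     elif tc == hc:
--         return (tr + rDir, tc)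
--     else:
--         return (tr + rDir, tc + cDir)
--
-- hr = hc = 0
--
-- hr = hc = 0
--
-- tr = tc = 0
--
-- tr = tc = 0
-- ===== SOURCE B (Python) =====
-- def movement(hr, hc, tr, tc):
--     if (hr - tr) ** 2 + (hc - tc) ** 2 <= 2:
--         return (tr, tc)
--     cands = [(tr + a, tc + b) for a in (-1, 0, 1) for b in (-1, 0, 1)]
--     return min(cands, key=lambda p: (hr - p[0]) ** 2 + (hc - p[1]) ** 2)
-- ===== Notes on version B (the rewrite author's own statement) =====
-- stated objective: alternative
-- what changed: B replaces A's 3x3 'safe' set (two nested range loops) and its three sign-step branches with a distance rule: stay when the squared Euclidean distance to the head is <= 2, otherwise pick the neighbouring cell (min over the 9 candidates) closest to the head in squared Euclidean distance.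
import Mathlib
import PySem

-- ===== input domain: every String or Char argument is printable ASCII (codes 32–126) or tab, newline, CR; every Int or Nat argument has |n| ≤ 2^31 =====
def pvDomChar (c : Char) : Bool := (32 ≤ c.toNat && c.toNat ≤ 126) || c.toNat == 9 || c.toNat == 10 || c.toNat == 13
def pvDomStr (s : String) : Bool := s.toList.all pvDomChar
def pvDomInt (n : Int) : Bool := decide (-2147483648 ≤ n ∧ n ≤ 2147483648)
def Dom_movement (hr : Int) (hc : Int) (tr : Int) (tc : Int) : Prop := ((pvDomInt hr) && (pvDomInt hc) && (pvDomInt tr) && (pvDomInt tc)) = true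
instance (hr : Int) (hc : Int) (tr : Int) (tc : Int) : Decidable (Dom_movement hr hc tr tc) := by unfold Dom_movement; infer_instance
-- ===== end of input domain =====

-- B replaces A's neighbourhood-set membership test and sign-step branches with a
-- squared-Euclidean-distance rule: stay if d² ≤ 2, else move to the neighbouring
-- cell nearest to the head, found by min over the 9 candidates (objective: alternative).

-- ===== PORT A =====
def isNegative (x : Int) : Int :=
  if x < 0 then -1 else if x > 0 then 1 else 0

def movement (hr : Int) (hc : Int) (tr : Int) (tc : Int) : Int × Int :=
  let safe : PySem.Set (Int × Int) :=
    (PySem.List.pyRange (hr - 1) (hr + 2) 1).foldl (fun s i =>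
      (PySem.List.pyRange (hc - 1) (hc + 2) 1).foldl (fun s j => PySem.Set.add s (i, j)) s)
      PySem.Set.empty
  let rDir := isNegative (hr - tr)
  let cDir := isNegative (hc - tc)
  if PySem.Set.contains safe (tr, tc) then (tr, tc)
  else if tr = hr then (tr, tc + cDir)
  else if tc = hc then (tr + rDir, tc)
  else (tr + rDir, tc + cDir)

-- ===== PORT B =====
def movement_alt (hr : Int) (hc : Int) (tr : Int) (tc : Int) : Int × Int :=
  if (hr - tr) ^ 2 + (hc - tc) ^ 2 ≤ 2 then (tr, tc)
  else
    let cands : List (Int × Int) :=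
      [(-1 : Int), 0, 1].flatMap (fun a => [(-1 : Int), 0, 1].map (fun b => (tr + a, tc + b)))
    -- Python's min over the (always non-empty) candidate list; .getD is never the default here
    (PySem.List.min? cands (fun p => (hr - p.1) ^ 2 + (hc - p.2) ^ 2)).getD (tr, tc)

-- ===== PRECONDITION & SPEC =====
def Spec_movement (hr : Int) (hc : Int) (tr : Int) (tc : Int) (out : Int × Int) : Prop := out = movement_alt hr hc tr tc
instance (hr : Int) (hc : Int) (tr : Int) (tc : Int) (out : Int × Int) : Decidable (Spec_movement hr hc tr tc out) := by unfold Spec_movement; infer_instance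

-- ===== CLAIM (what is proved, stated in full; the proofs are below) =====
def Claim_equal_movement : Prop := ∀ (hr : Int) (hc : Int) (tr : Int) (tc : Int), Dom_movement hr hc tr tc → Spec_movement hr hc tr tc (movement hr hc tr tc)

-- ===== LEMMAS AND PROOFS =====

-- The 3-element ranges A loops over, written out.
theorem pyRange_three (a : Int) :
    PySem.List.pyRange (a - 1) (a + 2) 1 = [a - 1, a, a + 1] := by
  rw [PySem.List.pyRange_one_cons (by omega), PySem.List.pyRange_one_cons (by omega),
      PySem.List.pyRange_one_cons (by omega), PySem.List.pyRange_one_eq_nil (by omega)]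
  simp only [List.cons.injEq, and_true]
  exact ⟨trivial, by ring, by ring⟩

-- Membership in A's 'safe' set is exactly Chebyshev-adjacency.
theorem safe_contains (hr hc tr tc : Int) :
    (PySem.Set.contains
      ((PySem.List.pyRange (hr - 1) (hr + 2) 1).foldl (fun s i =>
        (PySem.List.pyRange (hc - 1) (hc + 2) 1).foldl (fun s j => PySem.Set.add s (i, j)) s)
        PySem.Set.empty) (tr, tc)) = true ↔
    (-1 ≤ hr - tr ∧ hr - tr ≤ 1 ∧ -1 ≤ hc - tc ∧ hc - tc ≤ 1) := by
  rw [pyRange_three, pyRange_three]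
  simp only [List.foldl, PySem.Set.contains_iff, PySem.Set.mem_add, PySem.Set.empty,
    List.not_mem_nil, false_or, Prod.mk.injEq]
  omega

-- Chebyshev-adjacency is exactly squared distance ≤ 2 (over the integers).
theorem adj_iff (dr dc : Int) :
    dr ^ 2 + dc ^ 2 ≤ 2 ↔ (-1 ≤ dr ∧ dr ≤ 1 ∧ -1 ≤ dc ∧ dc ≤ 1) := by
  constructor
  · intro h
    refine ⟨?_, ?_, ?_, ?_⟩ <;>
      (by_contra hcon; push_neg at hcon; nlinarith [sq_nonneg dr, sq_nonneg dc])
  · rintro ⟨h1, h2, h3, h4⟩; nlinarith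

-- isNegative only takes the values -1, 0, 1.
theorem isNegative_cases (d : Int) : isNegative d = -1 ∨ isNegative d = 0 ∨ isNegative d = 1 := by
  unfold isNegative; split_ifs <;> simp

-- Per coordinate, the offset isNegative d is the unique minimiser of (d - a)² over {-1,0,1}.
theorem coord_min (d a : Int) (ha : a = -1 ∨ a = 0 ∨ a = 1) :
    (d - isNegative d) ^ 2 ≤ (d - a) ^ 2 ∧
      (a ≠ isNegative d → (d - isNegative d) ^ 2 < (d - a) ^ 2) := by
  unfold isNegative
  rcases lt_trichotomy d 0 with hd | rfl | hd
  · rw [if_pos hd]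
    rcases ha with rfl | rfl | rfl
    · exact ⟨le_refl _, fun hne => absurd rfl hne⟩
    · exact ⟨by nlinarith, fun _ => by nlinarith⟩
    · exact ⟨by nlinarith, fun _ => by nlinarith⟩
  · rcases ha with rfl | rfl | rfl <;> norm_num
  · rw [if_neg (by omega), if_pos hd]
    rcases ha with rfl | rfl | rfl
    · exact ⟨by nlinarith, fun _ => by nlinarith⟩
    · exact ⟨by nlinarith, fun _ => by nlinarith⟩
    · exact ⟨le_refl _, fun hne => absurd rfl hne⟩

-- First-minimum fold returns x when x is the unique strict minimiser.
theorem foldl_min_unique {α : Type} (key : α → Int) (x : α) :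
    ∀ (l : List α) (acc : Option α),
      (∀ y ∈ l, y ≠ x → key x < key y) →
      (acc = some x ∨ (x ∈ l ∧ ∀ m, acc = some m → key x < key m)) →
      l.foldl (fun acc z => match acc with
        | none => some z
        | some m => if key z < key m then some z else some m) acc = some x := by
  intro l
  induction l with
  | nil =>
    intro acc _ hacc
    rcases hacc with h1 | ⟨hx, _⟩
    · simpa using h1
    · cases hx
  | cons z rest ih =>
    intro acc hmin hacc
    simp only [List.foldl]
    rcases hacc with rfl | ⟨hx, hk⟩
    · -- acc was already some x: z cannot strictly beat it
      have hzx : ¬ key z < key x := by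
        by_cases hz : z = x
        · subst hz; exact lt_irrefl _
        · exact not_lt_of_gt (hmin z (List.mem_cons_self) hz)
      simp only [if_neg hzx]
      exact ih _ (fun y hy => hmin y (List.mem_cons_of_mem _ hy)) (Or.inl rfl)
    · cases acc with
      | none =>
        by_cases hz : z = x
        · subst hz
          exact ih _ (fun y hy => hmin y (List.mem_cons_of_mem _ hy)) (Or.inl rfl)
        · have hxr : x ∈ rest := by
            rcases List.mem_cons.mp hx with h | h
            · exact absurd h.symm hz
            · exact h
          refine ih _ (fun y hy => hmin y (List.mem_cons_of_mem _ hy)) (Or.inr ⟨hxr, ?_⟩)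
          intro m hm
          cases hm
          exact hmin z (List.mem_cons_self) hz
      | some m =>
        have hkm : key x < key m := hk m rfl
        by_cases hcmp : key z < key m
        · simp only [if_pos hcmp]
          by_cases hz : z = x
          · subst hz
            exact ih _ (fun y hy => hmin y (List.mem_cons_of_mem _ hy)) (Or.inl rfl)
          · have hxr : x ∈ rest := by
              rcases List.mem_cons.mp hx with h | h
              · exact absurd h.symm hz
              · exact h
            refine ih _ (fun y hy => hmin y (List.mem_cons_of_mem _ hy)) (Or.inr ⟨hxr, ?_⟩)
            intro m' hm'
            cases hm'
            exact hmin z (List.mem_cons_self) hz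
        · simp only [if_neg hcmp]
          have hz : z ≠ x := fun h => hcmp (h ▸ hkm)
          have hxr : x ∈ rest := by
            rcases List.mem_cons.mp hx with h | h
            · exact absurd h.symm hz
            · exact h
          refine ih _ (fun y hy => hmin y (List.mem_cons_of_mem _ hy)) (Or.inr ⟨hxr, fun m' hm' => ?_⟩)
          cases hm'
          exact hkm

-- PySem.List.min? returns the unique strict minimiser regardless of its position.
theorem min?_unique {α : Type} (l : List α) (key : α → Int) (x : α)
    (hx : x ∈ l) (hmin : ∀ y ∈ l, y ≠ x → key x < key y) :
    PySem.List.min? l key = some x := by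
  unfold PySem.List.min?
  exact foldl_min_unique key x l none hmin (Or.inr ⟨hx, fun m hm => by cases hm⟩)

-- The distance-minimising candidate is the sign-step cell.
theorem min_cands (hr hc tr tc : Int) :
    PySem.List.min?
      ([(-1 : Int), 0, 1].flatMap (fun a => [(-1 : Int), 0, 1].map (fun b => (tr + a, tc + b))))
      (fun p => (hr - p.1) ^ 2 + (hc - p.2) ^ 2)
      = some (tr + isNegative (hr - tr), tc + isNegative (hc - tc)) := by
  apply min?_unique
  · simp only [List.mem_flatMap, List.mem_map, List.mem_cons, List.not_mem_nil, or_false]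
    exact ⟨isNegative (hr - tr), isNegative_cases _, isNegative (hc - tc), isNegative_cases _, rfl⟩
  · intro y hy hne
    simp only [List.mem_flatMap, List.mem_map, List.mem_cons, List.not_mem_nil, or_false] at hy
    obtain ⟨a, ha, b, hb, rfl⟩ := hy
    have hkey : ∀ a' b' : Int, (hr - (tr + a')) = (hr - tr) - a' ∧ (hc - (tc + b')) = (hc - tc) - b' :=
      fun a' b' => ⟨by ring, by ring⟩
    have h1 := coord_min (hr - tr) a ha
    have h2 := coord_min (hc - tc) b hb
    have hab : a ≠ isNegative (hr - tr) ∨ b ≠ isNegative (hc - tc) := by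
      by_contra hcon
      push_neg at hcon
      exact hne (by rw [hcon.1, hcon.2])
    rw [(hkey a b).1, (hkey a b).2,
        (hkey (isNegative (hr - tr)) (isNegative (hc - tc))).1,
        (hkey (isNegative (hr - tr)) (isNegative (hc - tc))).2]
    rcases hab with h | h
    · exact add_lt_add_of_lt_of_le (h1.2 h) h2.1
    · exact add_lt_add_of_le_of_lt h1.1 (h2.2 h)

-- ===== VERDICT (by name: the statement is the Claim_ definition above) =====
theorem movement_spec : Claim_equal_movement := by
  intro hr hc tr tc _
  unfold Spec_movement movement movement_alt
  simp only []
  by_cases hadj : (hr - tr) ^ 2 + (hc - tc) ^ 2 ≤ 2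
  · rw [if_pos ((safe_contains hr hc tr tc).2 (by
      have := (adj_iff (hr - tr) (hc - tc)).1 hadj; tauto)), if_pos hadj]
  · rw [if_neg (fun h => hadj ((adj_iff (hr - tr) (hc - tc)).2 (by
      have := (safe_contains hr hc tr tc).1 h; tauto))), if_neg hadj,
      min_cands hr hc tr tc]
    simp only [Option.getD_some]
    by_cases h1 : tr = hr
    · rw [if_pos h1]
      have : isNegative (hr - tr) = 0 := by subst h1; simp [isNegative]
      rw [this]; ring_nf
    · rw [if_neg h1]
      by_cases h2 : tc = hc
      · rw [if_pos h2]
        have : isNegative (hc - tc) = 0 := by subst h2; simp [isNegative]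
        rw [this]; ring_nf
      · rw [if_neg h2]
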